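-- pv_equiv track=rewrite | github.com/seoul-ssafy-class-2-studyclub/Indong-python | Python/SWEA/D2/4835_구간합.py | calc_range
-- ===== SOURCE A (Python) =====
-- def calc_range(x, length, arr):
--     sum_array = [0]
--     for i in range(x):
--         if i == 0:
--             sum_array.append(arr[i])
--         else:
--             sum_array.append(sum_array[-1] + arr[i])
--
--     max_sum = 0
--     min_sum = sum_array[length] - sum_array[0]
--     for i in range(x - length + 1):
--         prefix_sum = sum_array[i+length] - sum_array[i]
--         if prefix_sum > max_sum:
--             max_sum = prefix_sum
--         elif prefix_sum < min_sum:
--             min_sum = prefix_sum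
--
--     return max_sum - min_sum
-- ===== SOURCE B (Python) =====
-- def calc_range(x, length, arr):
--     # Running sliding-window sum: no prefix-sum table is materialised.
--     window = 0
--     for i in range(length):
--         window += arr[i]
--     max_sum = 0
--     min_sum = window
--     for i in range(x - length + 1):
--         if window > max_sum:
--             max_sum = window
--         if window < min_sum:
--             min_sum = window
--         if i + length < x:
--             window += arr[i + length] - arr[i]
--     return max_sum - min_sum
-- ===== Notes on version B (the rewrite author's own statement) =====
-- stated objective: alternative
-- what changed: Replaces A's materialised prefix-sum table (built by repeated appends, then re-indexed to form each window sum) with a single running window sum updated in O(1) per slide, and replaces A's if/elif max-min update with two independent comparisons.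
import Mathlib
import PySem

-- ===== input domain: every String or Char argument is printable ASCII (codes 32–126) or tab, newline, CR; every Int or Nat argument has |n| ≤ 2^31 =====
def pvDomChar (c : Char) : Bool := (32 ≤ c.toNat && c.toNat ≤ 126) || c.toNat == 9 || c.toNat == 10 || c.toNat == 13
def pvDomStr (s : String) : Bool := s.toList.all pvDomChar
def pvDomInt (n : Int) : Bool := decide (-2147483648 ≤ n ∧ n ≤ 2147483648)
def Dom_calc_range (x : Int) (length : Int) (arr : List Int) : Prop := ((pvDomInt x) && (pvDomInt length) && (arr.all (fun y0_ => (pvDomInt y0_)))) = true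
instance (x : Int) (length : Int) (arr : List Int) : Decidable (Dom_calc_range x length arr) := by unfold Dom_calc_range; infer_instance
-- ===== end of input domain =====

-- B replaces A's materialised prefix-sum table with a running sliding-window sum
-- (O(1) extra space) and two independent max/min updates; same return value on Pre_.


-- ===== PORT A =====
-- Literal port of A. pyGetD (default 0) stands for Python's list indexing; inside
-- Pre_calc_range every index taken is in range, so the default is never read there.
def calc_range (x : Int) (length : Int) (arr : List Int) : Int :=
  let sum_array := (PySem.List.pyRange 0 x 1).foldl
    (fun sa i =>
      if i = 0 then sa ++ [PySem.List.pyGetD arr i 0]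
      else sa ++ [PySem.List.pyGetD sa (-1) 0 + PySem.List.pyGetD arr i 0]) [(0 : Int)]
  let min_sum := PySem.List.pyGetD sum_array length 0 - PySem.List.pyGetD sum_array 0 0
  let p := (PySem.List.pyRange 0 (x - length + 1) 1).foldl
    (fun (p : Int × Int) i =>
      let prefix_sum := PySem.List.pyGetD sum_array (i + length) 0 - PySem.List.pyGetD sum_array i 0
      if prefix_sum > p.1 then (prefix_sum, p.2)
      else if prefix_sum < p.2 then (p.1, prefix_sum)
      else p) ((0 : Int), min_sum)
  p.1 - p.2

def calc_range_alt (x : Int) (length : Int) (arr : List Int) : Int :=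
  let window := (PySem.List.pyRange 0 length 1).foldl
    (fun w i => w + PySem.List.pyGetD arr i 0) 0
  let s := (PySem.List.pyRange 0 (x - length + 1) 1).foldl
    (fun (s : Int × Int × Int) i =>
      let mx := if s.1 > s.2.1 then s.1 else s.2.1
      let mn := if s.1 < s.2.2 then s.1 else s.2.2
      let w := if i + length < x then s.1 + PySem.List.pyGetD arr (i + length) 0 - PySem.List.pyGetD arr i 0 else s.1
      (w, mx, mn)) (window, 0, window)
  s.2.1 - s.2.2

-- ===== PRECONDITION & SPEC =====
-- Pre_ is exactly the set of inputs on which Python A returns normally: the natural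
-- domain 0 ≤ length ≤ x ≤ len(arr), plus the degenerate x < 0 inputs with
-- length ∈ {0, -1} (both loops do no real work there and A returns 0); everywhere
-- else A raises IndexError.
def Pre_calc_range (x : Int) (length : Int) (arr : List Int) : Prop :=
  (0 ≤ length ∧ length ≤ x ∧ x ≤ (arr.length : Int)) ∨ (x < 0 ∧ (length = 0 ∨ length = -1))
instance (x : Int) (length : Int) (arr : List Int) : Decidable (Pre_calc_range x length arr) := by
  unfold Pre_calc_range; infer_instance
def pvWitness_calc_range : Int × Int × List Int := (3, 2, [1, -4, 2])

def Spec_calc_range (x : Int) (length : Int) (arr : List Int) (out : Int) : Prop := out = calc_range_alt x length arr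
instance (x : Int) (length : Int) (arr : List Int) (out : Int) : Decidable (Spec_calc_range x length arr out) := by unfold Spec_calc_range; infer_instance

-- ===== CLAIM (what is proved, stated in full; the proofs are below) =====
def Claim_equal_calc_range : Prop := ∀ (x : Int) (length : Int) (arr : List Int), Dom_calc_range x length arr → Pre_calc_range x length arr → Spec_calc_range x length arr (calc_range x length arr)

-- ===== LEMMAS AND PROOFS =====

def preSum (arr : List Int) (j : Nat) : Int := (arr.take j).sum

def wsum (arr : List Int) (l : Int) (i : Int) : Int :=
  preSum arr (i + l).toNat - preSum arr i.toNat

def stepA (s : Int × Int) (v : Int) : Int × Int :=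
  if v > s.1 then (v, s.2) else if v < s.2 then (s.1, v) else s

def stepB (s : Int × Int) (v : Int) : Int × Int :=
  ((if v > s.1 then v else s.1), (if v < s.2 then v else s.2))

theorem preSum_succ (arr : List Int) (j : Nat) (h : j < arr.length) :
    preSum arr (j + 1) = preSum arr j + arr[j] := List.sum_take_succ arr j h

theorem sum_array_eq (arr : List Int) (n : Nat) (hn : n ≤ arr.length) :
    (PySem.List.pyRange 0 (n : Int) 1).foldl
      (fun sa i =>
        if i = 0 then sa ++ [PySem.List.pyGetD arr i 0]
        else sa ++ [PySem.List.pyGetD sa (-1) 0 + PySem.List.pyGetD arr i 0]) [(0 : Int)]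
      = (List.range (n + 1)).map (preSum arr) := by
  induction n with
  | zero => simp [PySem.List.pyRange_one_eq_nil, preSum]
  | succ n ih =>
    have hn' : n ≤ arr.length := Nat.le_of_succ_le hn
    have hcast : ((n + 1 : Nat) : Int) = (n : Int) + 1 := by push_cast; ring
    rw [hcast, PySem.List.pyRange_one_succ_right (by positivity), List.foldl_append,
      ih hn']
    simp only [List.foldl_cons, List.foldl_nil]
    rcases Nat.eq_zero_or_pos n with h0 | hpos
    · subst h0
      simp [preSum, PySem.List.pyGetD_zero, List.range_succ, List.getD]
      cases arr with
      | nil => simp at hn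
      | cons a t => simp [List.take]
    · have hne : ((n : Int)) ≠ 0 := by omega
      rw [if_neg hne]
      have hsplit : (List.range (n + 1)).map (preSum arr)
          = (List.range n).map (preSum arr) ++ [preSum arr n] := by
        rw [List.range_succ, List.map_append, List.map_cons, List.map_nil]
      rw [hsplit, PySem.List.pyGetD_neg_one_append_singleton]
      have hget : PySem.List.pyGetD arr (n : Int) 0 = arr[n] := by
        rw [PySem.List.pyGetD_natCast]
        exact List.getD_eq_getElem arr 0 (by omega)
      have h2 : preSum arr (n + 1) = preSum arr n + arr[n] := preSum_succ arr n (by omega)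
      conv_rhs => rw [List.range_succ, List.map_append, List.map_cons, List.map_nil, hsplit]
      rw [hget, h2]

theorem sa_lookup (arr : List Int) (n : Nat) (j : Int) (h0 : 0 ≤ j) (h : j ≤ (n : Int)) :
    PySem.List.pyGetD ((List.range (n + 1)).map (preSum arr)) j 0 = preSum arr j.toNat := by
  rw [PySem.List.pyGetD_eq_getElem _ 0 h0 (by simp; omega)]
  simp

theorem window_nat (arr : List Int) (t : Nat) (h : t ≤ arr.length) :
    (List.range t).foldl (fun w k => w + arr.getD k 0) 0 = preSum arr t := by
  induction t with
  | zero => simp [preSum]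
  | succ t ih =>
    rw [List.range_succ, List.foldl_append, ih (by omega), List.foldl_cons, List.foldl_nil,
      preSum_succ arr t (by omega), List.getD_eq_getElem arr 0 (by omega)]

theorem wsum_succ (arr : List Int) (l i : Int) (h0 : 0 ≤ i) (hl : 0 ≤ l)
    (h : i + l < (arr.length : Int)) :
    wsum arr l i + PySem.List.pyGetD arr (i + l) 0 - PySem.List.pyGetD arr i 0
      = wsum arr l (i + 1) := by
  have h1 : (i + l).toNat < arr.length := by omega
  have h2 : i.toNat < arr.length := by omega
  rw [PySem.List.pyGetD_eq_getElem _ 0 (by omega) (by omega),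
    PySem.List.pyGetD_eq_getElem _ 0 h0 (by omega)]
  have e1 : (i + 1 + l).toNat = (i + l).toNat + 1 := by omega
  have e2 : (i + 1).toNat = i.toNat + 1 := by omega
  simp only [wsum, e1, e2, preSum_succ arr _ h1, preSum_succ arr _ h2]
  ring

theorem foldB_aux (arr : List Int) (x l : Int) (hl : 0 ≤ l) (hlx : l ≤ x)
    (hx : x ≤ (arr.length : Int)) :
    ∀ k : Nat, (k : Int) ≤ x - l + 1 →
    (PySem.List.pyRange 0 (k : Int) 1).foldl
      (fun (s : Int × Int × Int) i =>
        ((if i + l < x then s.1 + PySem.List.pyGetD arr (i + l) 0 - PySem.List.pyGetD arr i 0 else s.1),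
         (if s.1 > s.2.1 then s.1 else s.2.1),
         (if s.1 < s.2.2 then s.1 else s.2.2)))
      (wsum arr l 0, 0, wsum arr l 0)
    = (wsum arr l (min (k : Int) (x - l)),
       List.foldl stepB (0, wsum arr l 0) (((PySem.List.pyRange 0 (k : Int) 1).map (wsum arr l)))) := by
  intro k
  induction k with
  | zero =>
    intro _
    have hmin : min ((0 : Int)) (x - l) = 0 := by omega
    simp [PySem.List.pyRange_one_eq_nil, hmin]
  | succ k ih =>
    intro hk
    have hk' : (k : Int) ≤ x - l := by push_cast at hk; omega
    have hcast : ((k + 1 : Nat) : Int) = (k : Int) + 1 := by push_cast; ring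
    rw [hcast, PySem.List.pyRange_one_succ_right (by positivity), List.foldl_append,
      List.map_append, List.foldl_append, ih (by omega)]
    simp only [List.foldl_cons, List.foldl_nil, List.map_cons, List.map_nil]
    have hmink : min (k : Int) (x - l) = (k : Int) := by omega
    rw [hmink]
    by_cases hg : (k : Int) + l < x
    · rw [if_pos hg, wsum_succ arr l k (by positivity) hl (by omega)]
      have : min ((k : Int) + 1) (x - l) = (k : Int) + 1 := by omega
      rw [this]
      rfl
    · rw [if_neg hg]
      have : min ((k : Int) + 1) (x - l) = (k : Int) := by omega
      rw [this]
      rfl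

theorem stepA_first (v : Int) :
    stepA (0, v) v = stepB (0, v) v ∧ (stepA (0, v) v).2 ≤ (stepA (0, v) v).1 := by
  simp only [stepA, stepB]
  simp only [if_neg (lt_irrefl v)]
  by_cases h1 : v > (0 : Int)
  · rw [if_pos h1, if_pos h1]
    exact ⟨rfl, le_refl v⟩
  · rw [if_neg h1, if_neg h1]
    exact ⟨rfl, by show v ≤ 0; omega⟩

theorem fold_stepA_eq_stepB (vs : List Int) : ∀ (s : Int × Int), s.2 ≤ s.1 →
    List.foldl stepA s vs = List.foldl stepB s vs := by
  induction vs with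
  | nil => intro s _; rfl
  | cons v t ih =>
    intro s hs
    obtain ⟨a, b⟩ := s
    have hs' : b ≤ a := hs
    have hstep : stepA (a, b) v = stepB (a, b) v := by
      simp only [stepA, stepB]
      split_ifs with h1 h2 <;> first | rfl | (exfalso; omega)
    have hinv : (stepA (a, b) v).2 ≤ (stepA (a, b) v).1 := by
      simp only [stepA]
      split_ifs with h1 h2 <;> simp only <;> omega
    rw [List.foldl_cons, List.foldl_cons, hstep, ih _ (hstep ▸ hinv)]

theorem window_init_eq (arr : List Int) (l : Int) (h0 : 0 ≤ l) (h : l ≤ (arr.length : Int)) :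
    (PySem.List.pyRange 0 l 1).foldl (fun w i => w + PySem.List.pyGetD arr i 0) 0
      = preSum arr l.toNat := by
  rw [PySem.List.pyRange_one, List.foldl_map]
  simp only [sub_zero, zero_add, PySem.List.pyGetD_natCast]
  exact window_nat arr l.toNat (by omega)

theorem main_eq (x l : Int) (arr : List Int) (hl : 0 ≤ l) (hlx : l ≤ x)
    (hx : x ≤ (arr.length : Int)) : calc_range x l arr = calc_range_alt x l arr := by
  have hx0 : 0 ≤ x := le_trans hl hlx
  set n : Nat := x.toNat with hn
  have hxn : ((n : Nat) : Int) = x := Int.toNat_of_nonneg hx0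
  simp only [calc_range, calc_range_alt]
  -- A's prefix-sum table
  rw [← hxn, sum_array_eq arr n (by omega)]
  -- lookups
  have hl0 : PySem.List.pyGetD ((List.range (n + 1)).map (preSum arr)) l 0 = preSum arr l.toNat :=
    sa_lookup arr n l hl (by omega)
  have hz : PySem.List.pyGetD ((List.range (n + 1)).map (preSum arr)) 0 0 = preSum arr 0 := by
    have := sa_lookup arr n 0 le_rfl (by omega)
    simpa using this
  have hpre0 : preSum arr 0 = 0 := by simp [preSum]
  have hw0 : preSum arr l.toNat - 0 = wsum arr l 0 := by
    simp [wsum, hpre0]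
  rw [hl0, hz, hpre0, hw0]
  -- A's loop body is stepA on the window value
  rw [PySem.List.foldl_congr_mem _ _
    (fun (p : Int × Int) i => stepA p (wsum arr l i)) _
    (by
      intro acc i hi
      rw [PySem.List.mem_pyRange_one] at hi
      have e1 : PySem.List.pyGetD ((List.range (n + 1)).map (preSum arr)) (i + l) 0
          = preSum arr (i + l).toNat := sa_lookup arr n (i + l) (by omega) (by omega)
      have e2 : PySem.List.pyGetD ((List.range (n + 1)).map (preSum arr)) i 0
          = preSum arr i.toNat := sa_lookup arr n i (by omega) (by omega)
      simp only [e1, e2, stepA, wsum])]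
  rw [← List.foldl_map (f := wsum arr l) (g := stepA)]
  -- B's initial window
  rw [window_init_eq arr l hl (by omega)]
  have hwin : preSum arr l.toNat = wsum arr l 0 := by simp [wsum, hpre0]
  rw [hwin]
  -- B's loop via the invariant lemma
  have hk : ((((x : Int) - l + 1).toNat : Nat) : Int) = (n : Int) - l + 1 := by omega
  rw [← hk, foldB_aux arr (n : Int) l hl (by omega) (by omega) (x - l + 1).toNat (by omega), hk]
  -- both folds over the same window list
  have hlist : PySem.List.pyRange 0 ((n : Int) - l + 1) 1
      = 0 :: PySem.List.pyRange 1 ((n : Int) - l + 1) 1 := PySem.List.pyRange_one_cons (by omega)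
  rw [hlist, List.map_cons, List.foldl_cons, List.foldl_cons,
    (stepA_first (wsum arr l 0)).1,
    fold_stepA_eq_stepB _ _ ((stepA_first (wsum arr l 0)).1 ▸ (stepA_first (wsum arr l 0)).2)]

-- on the degenerate inputs (x < 0, length ∈ {0, -1}) both programs return 0
theorem degen_eq (x l : Int) (arr : List Int) (hx : x < 0) (hl : l = 0 ∨ l = -1) :
    calc_range x l arr = calc_range_alt x l arr := by
  have hr : PySem.List.pyRange 0 x 1 = [] := PySem.List.pyRange_one_eq_nil (by omega)
  have hD : PySem.List.pyGetD [(0 : Int)] (-1) 0 = 0 := by decide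
  rcases hl with rfl | rfl
  · have h2 : PySem.List.pyRange 0 (x + 1) 1 = [] :=
      PySem.List.pyRange_one_eq_nil (by omega)
    simp [calc_range, calc_range_alt, hr, h2]
  · rcases lt_or_ge x (-1) with hx2 | hx2
    · have h2 : PySem.List.pyRange 0 (x + 1 + 1) 1 = [] :=
        PySem.List.pyRange_one_eq_nil (by omega)
      simp [calc_range, calc_range_alt, hr, h2, hD]
    · have hx1 : x = -1 := by omega
      subst hx1
      have h2 : PySem.List.pyRange 0 1 1 = [(0 : Int)] := by decide
      simp [calc_range, calc_range_alt, hr, h2, hD]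

-- ===== VERDICT (by name: the statement is the Claim_ definition above) =====
theorem calc_range_spec : Claim_equal_calc_range := by
  intro x length arr _ hpre
  show calc_range x length arr = calc_range_alt x length arr
  rcases hpre with ⟨h1, h2, h3⟩ | ⟨hx, hl⟩
  · exact main_eq x length arr h1 h2 h3
  · exact degen_eq x length arr hx hl
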